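-- pv_equiv track=rewrite | github.com/adamml/advent-of-code | 2025/day03.py | recurse
-- ===== SOURCE A (Python) =====
-- def recurse(string, length):
--     maxm = 0
--     maxm_loc = 0
--     i = 0
--     while i < len(string) - (length):
--         if int(string[i]) > maxm:
--             maxm = int(string[i])
--             maxm_loc = i+1
--         i += 1
--     return maxm, maxm_loc
-- ===== SOURCE B (Python) =====
-- def recurse(string, length):
--     sub = string[:max(0, len(string) - length)]
--     maxd = max((int(c) for c in sub), default=0)
--     loc = sub.index(str(maxd)) + 1 if maxd > 0 else 0
--     return maxd, loc
-- ===== Notes on version B (the rewrite author's own statement) =====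
-- stated objective: simpler
-- what changed: Replaces A's fused while-loop that tracks the max digit and its position together with a slice, a one-pass max over the prefix, and a separate str.index lookup for the first position.
import Mathlib
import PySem

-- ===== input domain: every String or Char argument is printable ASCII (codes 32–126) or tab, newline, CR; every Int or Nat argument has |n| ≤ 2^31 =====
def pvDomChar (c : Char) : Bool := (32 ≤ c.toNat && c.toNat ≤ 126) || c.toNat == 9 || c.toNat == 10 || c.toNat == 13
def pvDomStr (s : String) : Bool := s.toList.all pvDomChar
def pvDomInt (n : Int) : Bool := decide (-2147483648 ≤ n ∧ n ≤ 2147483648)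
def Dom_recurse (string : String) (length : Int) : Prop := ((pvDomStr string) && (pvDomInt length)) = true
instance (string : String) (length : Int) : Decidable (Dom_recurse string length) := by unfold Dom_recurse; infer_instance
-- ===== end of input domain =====

-- B replaces A's fused max-and-location while-loop by a slice, a one-pass max and a
-- separate first-index lookup (objective: simpler decomposition; same return value).

-- ===== PORT A =====
-- int(c) for a single digit character; exact on '0'..'9' (Pre_ guarantees every scanned
-- character is a digit; elsewhere Python raises ValueError and Pre_ excludes the input).
def digInt (c : Char) : Int := (c.toNat : Int) - 48

-- A's while loop: i runs over 0 ≤ i < len(string) - length reading string[i]; transcribed as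
-- structural recursion over exactly that prefix of the characters, carrying i, maxm, maxm_loc.
def recurseLoop : List Char → Int → Int → Int → Int × Int
  | [], _, maxm, maxm_loc => (maxm, maxm_loc)
  | c :: t, i, maxm, maxm_loc =>
    if digInt c > maxm then recurseLoop t (i + 1) (digInt c) (i + 1)
    else recurseLoop t (i + 1) maxm maxm_loc

def recurse (string : String) (length : Int) : Int × Int :=
  recurseLoop (string.toList.take ((string.toList.length : Int) - length).toNat) 0 0 0

-- ===== PORT B =====
def recurse_alt (string : String) (length : Int) : Int × Int :=
  -- sub = string[:max(0, len(string) - length)]  (non-negative stop, so a plain prefix)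
  let sub := string.toList.take (max 0 ((string.toList.length : Int) - length)).toNat
  -- maxd = max((int(c) for c in sub), default=0)
  let maxd := sub.foldl (fun a c => max a (digInt c)) 0
  -- sub.index(str(maxd)): str(maxd) is a single digit character here (1 ≤ maxd ≤ 9 on Pre_),
  -- so it is the first index of that character; +1, else 0.
  if maxd > 0 then (maxd, (sub.findIdx (fun c => c == Char.ofNat (48 + maxd).toNat) : Int) + 1)
  else (maxd, 0)

-- ===== PRECONDITION & SPEC =====
-- Pre_ excludes exactly the inputs where A raises: negative length (IndexError past the end)
-- and a non-digit character in the scanned prefix (ValueError from int()).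
def Pre_recurse (string : String) (length : Int) : Prop :=
  0 ≤ length ∧
  (string.toList.take ((string.toList.length : Int) - length).toNat).all Char.isDigit = true
instance (string : String) (length : Int) : Decidable (Pre_recurse string length) := by
  unfold Pre_recurse; infer_instance
def pvWitness_recurse : String × Int := ("3179", 1)

def Spec_recurse (string : String) (length : Int) (out : Int × Int) : Prop := out = recurse_alt string length
instance (string : String) (length : Int) (out : Int × Int) : Decidable (Spec_recurse string length out) := by unfold Spec_recurse; infer_instance

-- ===== CLAIM (what is proved, stated in full; the proofs are below) =====
def Claim_equal_recurse : Prop := ∀ (string : String) (length : Int), Dom_recurse string length → Pre_recurse string length → Spec_recurse string length (recurse string length)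

-- ===== LEMMAS AND PROOFS =====

def pmax (m : Int) (l : List Char) : Int := l.foldl (fun a c => max a (digInt c)) m

theorem pmax_nil (m : Int) : pmax m [] = m := rfl

theorem pmax_cons (m : Int) (c : Char) (t : List Char) :
    pmax m (c :: t) = pmax (max m (digInt c)) t := rfl

theorem le_pmax (m : Int) (l : List Char) : m ≤ pmax m l := by
  induction l generalizing m with
  | nil => simp [pmax_nil]
  | cons c t ih =>
    calc m ≤ max m (digInt c) := le_max_left _ _
    _ ≤ pmax (max m (digInt c)) t := ih _
    _ = pmax m (c :: t) := (pmax_cons ..).symm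

theorem findIdx_congr {α : Type} (p q : α → Bool) (l : List α)
    (h : ∀ a ∈ l, p a = q a) : l.findIdx p = l.findIdx q := by
  induction l with
  | nil => rfl
  | cons a t ih =>
    simp only [List.findIdx_cons, h a (by simp)]
    cases q a with
    | true => rfl
    | false => simp [ih (fun b hb => h b (by simp [hb]))]

-- invariant of A's loop: it computes the running max and (if the max grew) the 1-based
-- position of its first attainment
theorem recurseLoop_eq (l : List Char) (i m p : Int) :
    recurseLoop l i m p =
      (pmax m l,
        if pmax m l > m
        then i + (l.findIdx (fun c => digInt c == pmax m l) : Int) + 1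
        else p) := by
  induction l generalizing i m p with
  | nil => simp [recurseLoop, pmax_nil]
  | cons c t ih =>
    rw [recurseLoop, pmax_cons]
    by_cases hc : digInt c > m
    · rw [if_pos hc, ih]
      have hmc : max m (digInt c) = digInt c := max_eq_right (le_of_lt hc)
      rw [hmc]
      have hM : digInt c ≤ pmax (digInt c) t := le_pmax _ _
      have hMm : pmax (digInt c) t > m := lt_of_lt_of_le hc hM
      rw [if_pos hMm]
      by_cases hgt : pmax (digInt c) t > digInt c
      · rw [if_pos hgt]
        have hne : (digInt c == pmax (digInt c) t) = false := by
          simp; omega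
        simp only [List.findIdx_cons, hne, cond_false]
        congr 1
        push_cast
        ring
      · rw [if_neg hgt]
        have heq : (digInt c == pmax (digInt c) t) = true := by
          simp; omega
        simp only [List.findIdx_cons, heq, cond_true]
        norm_num
    · rw [if_neg hc, ih]
      have hmc : max m (digInt c) = m := max_eq_left (by omega)
      rw [hmc]
      by_cases hgt : pmax m t > m
      · rw [if_pos hgt, if_pos hgt]
        have hne : (digInt c == pmax m t) = false := by
          simp; omega
        simp only [List.findIdx_cons, hne, cond_false]
        congr 1
        push_cast
        ring
      · rw [if_neg hgt, if_neg hgt]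

theorem pmax_le_nine (m : Int) (l : List Char) (hm : m ≤ 9)
    (h : ∀ c ∈ l, 48 ≤ c.toNat ∧ c.toNat ≤ 57) : pmax m l ≤ 9 := by
  induction l generalizing m with
  | nil => simpa [pmax_nil] using hm
  | cons c t ih =>
    rw [pmax_cons]
    have hc := h c (by simp)
    have hc9 : digInt c ≤ 9 := by
      have h57 : c.toNat ≤ 57 := hc.2
      simp only [digInt]; omega
    exact ih _ (by omega) (fun b hb => h b (by simp [hb]))

theorem recurse_spec : Claim_equal_recurse := by
  intro string length _ hpre
  obtain ⟨hlen, hdig⟩ := hpre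
  rw [List.all_eq_true] at hdig
  unfold Spec_recurse recurse recurse_alt
  set sub := string.toList.take ((string.toList.length : Int) - length).toNat with hsub
  have hdig' : ∀ c ∈ sub, 48 ≤ c.toNat ∧ c.toNat ≤ 57 := by
    intro c hc
    have h := hdig c hc
    simp [Char.isDigit] at h
    exact ⟨h.1, h.2⟩
  have hmax0 : (max 0 ((string.toList.length : Int) - length)).toNat
      = ((string.toList.length : Int) - length).toNat := by omega
  rw [hmax0, ← hsub]
  rw [recurseLoop_eq]
  have hpm : pmax 0 sub = sub.foldl (fun a c => max a (digInt c)) 0 := rfl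
  by_cases hpos : pmax 0 sub > 0
  · rw [if_pos hpos]
    simp only [← hpm, if_pos hpos]
    have h9 : pmax 0 sub ≤ 9 := pmax_le_nine 0 sub (by norm_num) hdig'
    have hfind : sub.findIdx (fun c => digInt c == pmax 0 sub)
        = sub.findIdx (fun c => c == Char.ofNat (48 + pmax 0 sub).toNat) := by
      apply findIdx_congr
      intro c hc
      have hcn : 48 ≤ c.toNat ∧ c.toNat ≤ 57 := hdig' c hc
      have hvalid : Nat.isValidChar (48 + pmax 0 sub).toNat := by
        unfold Nat.isValidChar; omega
      have hto : (Char.ofNat (48 + pmax 0 sub).toNat).toNat = (48 + pmax 0 sub).toNat := by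
        simp [Char.toNat_ofNat, hvalid]
      rw [Bool.eq_iff_iff]
      simp only [beq_iff_eq]
      constructor
      · intro he
        apply Char.ext
        apply UInt32.toNat_inj.mp
        show c.toNat = (Char.ofNat (48 + pmax 0 sub).toNat).toNat
        rw [hto]
        simp only [digInt] at he
        omega
      · intro he
        rw [he]
        simp only [digInt, hto]
        omega
    rw [hfind]
    norm_num
  · rw [if_neg hpos]
    simp only [← hpm, if_neg hpos]
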